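-- pv_equiv track=rewrite | github.com/JK0201/Algorithm | 프로그래머스/0/181943. 문자열 겹쳐쓰기/문자열 겹쳐쓰기.py | solution
-- ===== SOURCE A (Python) =====
-- def solution(my_string, overwrite_string, s):
--     answer = ''
--
--     for l in range(len(my_string)):
--         if l >= s and l-s < len(overwrite_string):
--             answer += overwrite_string[l-s]
--         else:
--             answer += my_string[l]
--
--     return answer
-- ===== SOURCE B (Python) =====
-- def solution(my_string, overwrite_string, s):
--     start = max(s, 0)
--     part = overwrite_string[max(-s, 0):]
--     return (my_string[:start] + part + my_string[start + len(part):])[:len(my_string)]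
-- ===== Notes on version B (the rewrite author's own statement) =====
-- stated objective: faster
-- what changed: A builds the answer character by character in an index loop with a per-index branch; B computes the three segments directly by slicing (prefix, clipped overwrite, tail) and caps the concatenation to the original length.
import Mathlib
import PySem

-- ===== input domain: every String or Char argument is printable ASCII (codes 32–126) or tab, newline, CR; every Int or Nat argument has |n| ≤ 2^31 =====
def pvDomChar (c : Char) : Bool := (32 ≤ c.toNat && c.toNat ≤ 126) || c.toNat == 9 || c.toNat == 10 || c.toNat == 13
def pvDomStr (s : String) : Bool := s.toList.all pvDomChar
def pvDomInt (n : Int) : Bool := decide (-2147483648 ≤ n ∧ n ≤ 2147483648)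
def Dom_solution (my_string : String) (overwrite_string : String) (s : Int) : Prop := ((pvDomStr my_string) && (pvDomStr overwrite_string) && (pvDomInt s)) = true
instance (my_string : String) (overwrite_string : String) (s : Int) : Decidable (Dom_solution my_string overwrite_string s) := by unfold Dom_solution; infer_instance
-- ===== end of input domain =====

-- B replaces A's per-character loop with three direct slices (prefix, overwrite part, tail)
-- capped to the original length; same return value on every input (both are total).

-- ===== PORT A =====
-- literal port of A: loop l over range(len(my_string)), appending one character per step
-- (pyGetD is used where Python indexes; both indexings are guarded in range by the loop/branch)
def solution (my_string : String) (overwrite_string : String) (s : Int) : String :=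
  let m := my_string.toList
  let o := overwrite_string.toList
  String.ofList ((PySem.List.pyRange 0 (m.length : Int) 1).foldl
    (fun answer l =>
      if s ≤ l ∧ l - s < (o.length : Int) then
        answer ++ [PySem.List.pyGetD o (l - s) ' ']
      else
        answer ++ [PySem.List.pyGetD m l ' ']) [])

-- ===== PORT B =====
-- literal port of Source B: prefix slice + clipped overwrite slice + tail slice, capped to len(my_string)
def solution_alt (my_string : String) (overwrite_string : String) (s : Int) : String :=
  let m := my_string.toList
  let o := overwrite_string.toList
  let start := max s 0
  let part := PySem.List.slice o (some (max (-s) 0)) none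
  String.ofList (PySem.List.slice
    (PySem.List.slice m none (some start) ++ part ++
      PySem.List.slice m (some (start + (part.length : Int))) none)
    none (some (m.length : Int)))

-- ===== PRECONDITION & SPEC =====
def Spec_solution (my_string : String) (overwrite_string : String) (s : Int) (out : String) : Prop := out = solution_alt my_string overwrite_string s
instance (my_string : String) (overwrite_string : String) (s : Int) (out : String) : Decidable (Spec_solution my_string overwrite_string s out) := by unfold Spec_solution; infer_instance

-- ===== CLAIM (what is proved, stated in full; the proofs are below) =====
def Claim_equal_solution : Prop := ∀ (my_string : String) (overwrite_string : String) (s : Int), Dom_solution my_string overwrite_string s → Spec_solution my_string overwrite_string s (solution my_string overwrite_string s)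

-- ===== LEMMAS AND PROOFS =====

-- getElem respects index equality (proof helper)
theorem pv_getElem_congr {α : Type} {l : List α} {i j : Nat} (hi : i < l.length) (h : i = j) :
    l[i]'hi = l[j]'(h ▸ hi) := by subst h; rfl

-- the whole equivalence, stated on the underlying character lists
theorem core_eq (m o : List Char) (s : Int) :
    (PySem.List.pyRange 0 (m.length : Int) 1).map
      (fun l => if s ≤ l ∧ l - s < (o.length : Int)
                then PySem.List.pyGetD o (l - s) ' '
                else PySem.List.pyGetD m l ' ')
    = (m.take (max s 0).toNat ++ o.drop (max (-s) 0).toNat ++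
        m.drop ((max s 0).toNat + (o.length - (max (-s) 0).toNat))).take m.length := by
  rw [PySem.List.pyRange_one, List.map_map]
  apply List.ext_getElem
  · simp [List.length_take, List.length_append, List.length_drop]
    omega
  · intro k h1 h2
    simp only [List.getElem_map, List.getElem_range, Function.comp_apply, List.getElem_take]
    have hkn : k < m.length := by simpa using h1
    have hA1 : (m.take (max s 0).toNat).length = min (max s 0).toNat m.length := by simp
    have hA2 : (o.drop (max (-s) 0).toNat).length = o.length - (max (-s) 0).toNat := by simp
    by_cases hc : s ≤ ((0 : Int) + (k : Int)) ∧ ((0 : Int) + (k : Int)) - s < (o.length : Int)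
    · have hlt : k < (m.take (max s 0).toNat ++ o.drop (max (-s) 0).toNat).length := by
        rw [List.length_append, hA1, hA2]; omega
      have hge : (m.take (max s 0).toNat).length ≤ k := by rw [hA1]; omega
      rw [if_pos hc, List.getElem_append_left hlt, List.getElem_append_right hge,
          List.getElem_drop, PySem.List.pyGetD_eq_getElem o ' ' (by omega) (by omega)]
      exact pv_getElem_congr _ (by rw [hA1]; omega)
    · rw [if_neg hc, PySem.List.pyGetD_eq_getElem m ' ' (by omega) (by omega)]
      by_cases hk1 : k < (m.take (max s 0).toNat).length
      · have hlt : k < (m.take (max s 0).toNat ++ o.drop (max (-s) 0).toNat).length := by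
          rw [List.length_append]; omega
        rw [List.getElem_append_left hlt, List.getElem_append_left hk1, List.getElem_take]
        exact pv_getElem_congr _ (by omega)
      · have hge : (m.take (max s 0).toNat ++ o.drop (max (-s) 0).toNat).length ≤ k := by
          rw [List.length_append, hA1, hA2]; rw [hA1] at hk1; omega
        rw [List.getElem_append_right hge, List.getElem_drop]
        exact pv_getElem_congr _
          (by rw [List.length_append, hA1, hA2]; omega)

-- ===== VERDICT (by name: the statement is the Claim_ definition above) =====
theorem solution_spec : Claim_equal_solution := by
  intro my_string overwrite_string s _
  unfold Spec_solution solution solution_alt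
  dsimp only
  refine congrArg String.ofList ?_
  rw [show (fun (answer : List Char) (l : Int) =>
        if s ≤ l ∧ l - s < ((overwrite_string.toList.length : Int)) then
          answer ++ [PySem.List.pyGetD overwrite_string.toList (l - s) ' ']
        else
          answer ++ [PySem.List.pyGetD my_string.toList l ' '])
      = (fun answer l => answer ++
          [if s ≤ l ∧ l - s < ((overwrite_string.toList.length : Int)) then
             PySem.List.pyGetD overwrite_string.toList (l - s) ' '
           else PySem.List.pyGetD my_string.toList l ' ']) from
      funext₂ fun a l => by split <;> rfl]
  rw [PySem.List.foldl_append_singleton_eq_map, List.nil_append]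
  rw [PySem.List.slice_to _ (by positivity), PySem.List.slice_from _ (le_max_right _ _),
      PySem.List.slice_from _ (by positivity), PySem.List.slice_to _ (by positivity)]
  rw [List.length_drop]
  rw [show ((max s 0) + ((overwrite_string.toList.length - (max (-s) 0).toNat : Nat) : Int)).toNat
        = (max s 0).toNat + (overwrite_string.toList.length - (max (-s) 0).toNat) from by omega]
  rw [Int.toNat_natCast]
  exact core_eq my_string.toList overwrite_string.toList s
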